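-- pv_equiv track=rewrite | github.com/jossrayn/Des | backend/Des2.py | agrupasicon
-- ===== SOURCE A (Python) =====
-- def agrupasicon(cadena):
--     agrepasionResultando=""
--     for i in range(len(cadena)):
--         if i%4==0:
--             agrepasionResultando+=" "
--             agrepasionResultando+=cadena[i]
--         else:
--             agrepasionResultando+=cadena[i]
--     return agrepasionResultando
-- ===== SOURCE B (Python) =====
-- def agrupasicon(cadena):
--     return "".join(" " + cadena[i:i+4] for i in range(0, len(cadena), 4))
-- ===== Notes on version B (the rewrite author's own statement) =====
-- stated objective: idiomatic
-- what changed: Replaces the per-character index loop with an i%4 branch by a join of space-prefixed 4-character slices taken with range(0, len, 4), iterating over blocks instead of characters.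
import Mathlib
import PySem

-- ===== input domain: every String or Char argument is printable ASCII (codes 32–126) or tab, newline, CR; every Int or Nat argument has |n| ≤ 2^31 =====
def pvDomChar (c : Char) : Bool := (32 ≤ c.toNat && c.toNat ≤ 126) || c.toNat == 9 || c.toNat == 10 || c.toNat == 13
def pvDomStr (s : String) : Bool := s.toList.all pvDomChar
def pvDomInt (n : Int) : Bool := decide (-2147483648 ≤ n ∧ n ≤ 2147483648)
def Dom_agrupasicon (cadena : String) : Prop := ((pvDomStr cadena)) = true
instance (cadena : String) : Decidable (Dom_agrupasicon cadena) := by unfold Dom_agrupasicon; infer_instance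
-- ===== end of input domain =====

-- B replaces A's per-character index loop (with its i%4 branch) by a join of space-prefixed
-- 4-character slices taken with a step-4 range; objective: idiomatic.

-- ===== PORT A =====
-- index i is always in range, so cadena[i] is pyGetD with a dummy default
def agrupasicon (cadena : String) : String :=
  String.ofList
    ((PySem.List.pyRange 0 (PySem.Str.len cadena) 1).foldl
      (fun acc i =>
        if PySem.Int.mod i 4 = 0 then (acc ++ [' ']) ++ [PySem.List.pyGetD cadena.toList i ' ']
        else acc ++ [PySem.List.pyGetD cadena.toList i ' ']) [])

-- ===== PORT B =====
-- "".join(" " + cadena[i:i+4] for i in range(0, len(cadena), 4))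
def agrupasicon_alt (cadena : String) : String :=
  String.ofList
    ((PySem.List.pyRange 0 (PySem.Str.len cadena) 4).foldl
      (fun acc i => acc ++ (' ' :: PySem.List.slice cadena.toList (some i) (some (i + 4)))) [])

-- ===== PRECONDITION & SPEC =====
def Spec_agrupasicon (cadena : String) (out : String) : Prop := out = agrupasicon_alt cadena
instance (cadena : String) (out : String) : Decidable (Spec_agrupasicon cadena out) := by unfold Spec_agrupasicon; infer_instance

-- ===== CLAIM (what is proved, stated in full; the proofs are below) =====
def Claim_equal_agrupasicon : Prop := ∀ (cadena : String), Dom_agrupasicon cadena → Spec_agrupasicon cadena (agrupasicon cadena)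

-- ===== LEMMAS AND PROOFS =====

-- the common reference value: one space-prefixed 4-chunk per recursion step
def chunks (cs : List Char) : List Char :=
  if cs = [] then [] else (' ' :: cs.take 4) ++ chunks (cs.drop 4)
termination_by cs.length
decreasing_by
  rename_i h
  have : cs.length ≠ 0 := fun hz => h (List.eq_nil_of_length_eq_zero hz)
  simp only [List.length_drop]
  omega

theorem pyRange4_cons (a b : Int) (h : a < b) :
    PySem.List.pyRange a b 4 = a :: PySem.List.pyRange (a + 4) b 4 := by
  rw [PySem.List.pyRange_of_pos a b (by norm_num),
      PySem.List.pyRange_of_pos (a + 4) b (by norm_num)]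
  rw [if_pos h]
  have hc : ((b - a + 4 - 1) / 4).toNat
      = (if a + 4 < b then ((b - (a + 4) + 4 - 1) / 4).toNat else 0) + 1 := by
    split_ifs with h4 <;> omega
  rw [hc, List.range_succ_eq_map, List.map_cons, List.map_map]
  congr 1
  · push_cast; ring
  · apply List.map_congr_left; intro k _; simp only [Function.comp]; push_cast; ring

theorem pyRange4_nil (a b : Int) (h : b ≤ a) : PySem.List.pyRange a b 4 = [] := by
  rw [PySem.List.pyRange_of_pos a b (by norm_num), if_neg (by omega)]
  simp

-- A's fold over enumerated characters, from any 4-divisible start index, produces the chunks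
theorem fold_enum_eq_chunks (cs : List Char) (s : Int) (acc : List Char)
    (hs : (4:Int) ∣ s) :
    (PySem.List.enumerate cs s).foldl
      (fun acc (p : Int × Char) =>
        if PySem.Int.mod p.1 4 = 0 then (acc ++ [' ']) ++ [p.2] else acc ++ [p.2]) acc
      = acc ++ chunks cs := by
  have h0 : PySem.Int.mod s 4 = 0 := (PySem.Int.mod_eq_zero_iff_dvd s 4).mpr hs
  have h1 : PySem.Int.mod (s+1) 4 ≠ 0 := by
    rw [Ne, PySem.Int.mod_eq_zero_iff_dvd]; omega
  have h2 : PySem.Int.mod (s+1+1) 4 ≠ 0 := by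
    rw [Ne, PySem.Int.mod_eq_zero_iff_dvd]; omega
  have h3 : PySem.Int.mod (s+1+1+1) 4 ≠ 0 := by
    rw [Ne, PySem.Int.mod_eq_zero_iff_dvd]; omega
  match cs with
  | [] => simp [chunks, PySem.List.enumerate]
  | [a] =>
    simp only [PySem.List.enumerate, List.foldl_cons, List.foldl_nil]
    rw [if_pos h0]
    simp [chunks]
  | [a, b] =>
    simp only [PySem.List.enumerate, List.foldl_cons, List.foldl_nil]
    rw [if_pos h0, if_neg h1]
    simp [chunks]
  | [a, b, c] =>
    simp only [PySem.List.enumerate, List.foldl_cons, List.foldl_nil]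
    rw [if_pos h0, if_neg h1, if_neg h2]
    simp [chunks]
  | a :: b :: c :: d :: t =>
    have ih := fold_enum_eq_chunks t (s + 4) (acc ++ [' ', a, b, c, d]) (by omega)
    simp only [PySem.List.enumerate_cons, List.foldl_cons]
    rw [if_pos h0, if_neg h1, if_neg h2, if_neg h3,
        show s + 1 + 1 + 1 + 1 = s + 4 by ring,
        show (((acc ++ [' ']) ++ [a]) ++ [b]) ++ [c] ++ [d] = acc ++ [' ', a, b, c, d] by simp,
        ih]
    conv_rhs => rw [chunks]
    simp
termination_by cs.length

-- B's step-4 fold over slices, from any start offset, produces the chunks of the rest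
theorem foldB_eq_chunks (full : List Char) (j : Nat) (acc : List Char) :
    (PySem.List.pyRange (j:Int) (full.length:Int) 4).foldl
      (fun acc i => acc ++ (' ' :: PySem.List.slice full (some i) (some (i + 4)))) acc
      = acc ++ chunks (full.drop j) := by
  by_cases h : j < full.length
  · rw [pyRange4_cons _ _ (by exact_mod_cast h), List.foldl_cons,
        show ((j:Int) + 4) = ((j:Int) + ((4:Nat):Int)) by norm_num,
        PySem.List.slice_natCast_add full j 4,
        show ((j:Int) + ((4:Nat):Int)) = (((j + 4 : Nat)):Int) by push_cast; ring]
    rw [foldB_eq_chunks full (j + 4) _]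
    conv_rhs => rw [chunks]
    rw [if_neg (by
      intro hnil
      have := congrArg List.length hnil
      simp only [List.length_drop, List.length_nil] at this
      omega)]
    simp [List.drop_drop]
  · rw [pyRange4_nil _ _ (by exact_mod_cast Nat.le_of_not_lt h), List.foldl_nil,
        List.drop_eq_nil_of_le (Nat.le_of_not_lt h)]
    simp [chunks]
termination_by full.length - j
decreasing_by omega

-- ===== VERDICT (by name: the statement is the Claim_ definition above) =====
theorem agrupasicon_spec : Claim_equal_agrupasicon := by
  intro cadena _
  unfold Spec_agrupasicon agrupasicon agrupasicon_alt
  congr 1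
  rw [PySem.Str.len_eq]
  have hA :
      (PySem.List.pyRange 0 ((cadena.toList.length : Int)) 1).foldl
        (fun acc i =>
          if PySem.Int.mod i 4 = 0 then (acc ++ [' ']) ++ [PySem.List.pyGetD cadena.toList i ' ']
          else acc ++ [PySem.List.pyGetD cadena.toList i ' ']) []
      = (PySem.List.enumerate cadena.toList 0).foldl
          (fun acc (p : Int × Char) =>
            if PySem.Int.mod p.1 4 = 0 then (acc ++ [' ']) ++ [p.2] else acc ++ [p.2]) [] := by
    rw [PySem.List.enumerate_eq_map_pyRange cadena.toList ' ', List.foldl_map]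
    rfl
  rw [hA, fold_enum_eq_chunks cadena.toList 0 [] (by omega)]
  have hB := foldB_eq_chunks cadena.toList 0 []
  simp only [Nat.cast_zero, List.drop_zero, List.nil_append] at hB
  rw [hB]
  simp
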